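-- pv_equiv track=rewrite | github.com/cayomol01/Lab1_Compiladores | pruebas/ConjuntoAutomata.py | multicheck
-- ===== SOURCE A (Python) =====
-- def checkEquality(a,b):
--     if a.keys()!=b.keys():
--         return False
--     #Tienen las mismas keys por lo tanto podemos recorrer solo uno de los diccionarios
--     for key, value in a.items():
--         c = set(a[key])
--         d = set(b[key])
--         if c !=d:
--             return False
--
--     return True
--
-- def multicheck(a_list, b):
--     b_list = []
--     for a in a_list:
--         b_list.append(checkEquality(a,b))
--     for i in range(len(b_list)):
--         if b_list[i] == True:
--             return True, i
--     return False, -1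
-- ===== SOURCE B (Python) =====
-- def checkEquality(a, b):
--     return a.keys() == b.keys() and all(set(a[k]) == set(b[k]) for k in a)
--
-- def multicheck(a_list, b):
--     for i, a in enumerate(a_list):
--         if checkEquality(a, b):
--             return True, i
--     return False, -1
-- ===== Notes on version B (the rewrite author's own statement) =====
-- stated objective: simpler
-- what changed: multicheck's two passes (materialize the full boolean table, then index-scan it) are fused into one early-exit enumerate scan with no intermediate list, and checkEquality becomes a single boolean expression using all().
import Mathlib
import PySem

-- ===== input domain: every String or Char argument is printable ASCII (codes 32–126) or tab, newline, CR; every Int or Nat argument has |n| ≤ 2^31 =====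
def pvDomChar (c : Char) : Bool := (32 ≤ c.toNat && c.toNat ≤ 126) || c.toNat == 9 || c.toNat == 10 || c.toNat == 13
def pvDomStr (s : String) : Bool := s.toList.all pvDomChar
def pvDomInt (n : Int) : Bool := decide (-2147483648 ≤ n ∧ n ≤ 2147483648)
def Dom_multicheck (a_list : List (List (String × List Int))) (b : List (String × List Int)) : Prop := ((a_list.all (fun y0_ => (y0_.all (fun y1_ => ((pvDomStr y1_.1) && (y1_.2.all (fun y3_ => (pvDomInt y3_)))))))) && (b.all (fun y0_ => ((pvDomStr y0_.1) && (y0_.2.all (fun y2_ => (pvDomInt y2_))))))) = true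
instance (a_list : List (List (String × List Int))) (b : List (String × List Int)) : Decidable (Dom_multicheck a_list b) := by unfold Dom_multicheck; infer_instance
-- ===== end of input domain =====

-- B fuses A's two passes (build the full boolean table, then index-scan it) into one
-- early-exit scan with no intermediate list; checkEquality becomes a single boolean expression.

-- shared primitive: `d[k]` on a dict, first-binding lookup; exact here because both
-- programs only evaluate it on a key `k` of `d` (guarded by the keys-equality check).
def pvLookup (d : List (String × List Int)) (k : String) : List Int :=
  (PySem.Dict.mk d).getD k []

-- shared primitive: Python's `a.keys() == b.keys()` (dict key views compare as sets)
def pvKeysEq (a b : List (String × List Int)) : Bool :=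
  PySem.Set.equal (PySem.Set.ofList (a.map Prod.fst)) (PySem.Set.ofList (b.map Prod.fst))

-- ===== PORT A =====
-- the `for key, value in a.items()` loop of A's checkEquality (early return False)
def pvChkLoopA (aF b : List (String × List Int)) : List (String × List Int) → Bool
  | [] => true
  | (key, _) :: rest =>
      if ¬ (PySem.Set.equal (PySem.Set.ofList (pvLookup aF key))
              (PySem.Set.ofList (pvLookup b key))) then false
      else pvChkLoopA aF b rest

def pvCheckEqualityA (a b : List (String × List Int)) : Bool :=
  if pvKeysEq a b = false then false else pvChkLoopA a b a

-- the `for i in range(len(b_list))` scan with early return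
def pvScanLoopA (bl : List Bool) : List Int → Bool × Int
  | [] => (false, -1)
  | i :: rest =>
      if PySem.List.pyGetD bl i false == true then (true, i) else pvScanLoopA bl rest

def multicheck (a_list : List (List (String × List Int))) (b : List (String × List Int)) : Bool × Int :=
  let b_list := a_list.foldl (fun acc a => acc ++ [pvCheckEqualityA a b]) []
  pvScanLoopA b_list (PySem.List.pyRange 0 (b_list.length : Int) 1)

-- ===== PORT B =====
def pvCheckEqualityB (a b : List (String × List Int)) : Bool :=
  pvKeysEq a b &&
    (a.map Prod.fst).all (fun k =>
      PySem.Set.equal (PySem.Set.ofList (pvLookup a k)) (PySem.Set.ofList (pvLookup b k)))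

-- the single early-exit `for i, a in enumerate(a_list)` loop
def pvMcLoopB (b : List (String × List Int)) : List (List (String × List Int)) → Int → Bool × Int
  | [], _ => (false, -1)
  | a :: rest, i => if pvCheckEqualityB a b then (true, i) else pvMcLoopB b rest (i + 1)

def multicheck_alt (a_list : List (List (String × List Int))) (b : List (String × List Int)) : Bool × Int :=
  pvMcLoopB b a_list 0

-- ===== PRECONDITION & SPEC =====
def Spec_multicheck (a_list : List (List (String × List Int))) (b : List (String × List Int)) (out : Bool × Int) : Prop := out = multicheck_alt a_list b
instance (a_list : List (List (String × List Int))) (b : List (String × List Int)) (out : Bool × Int) : Decidable (Spec_multicheck a_list b out) := by unfold Spec_multicheck; infer_instance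

-- ===== CLAIM (what is proved, stated in full; the proofs are below) =====
def Claim_equal_multicheck : Prop := ∀ (a_list : List (List (String × List Int))) (b : List (String × List Int)), Dom_multicheck a_list b → Spec_multicheck a_list b (multicheck a_list b)

-- ===== LEMMAS AND PROOFS =====

theorem pvChkLoopA_eq_all (aF b : List (String × List Int)) :
    ∀ l : List (String × List Int),
      pvChkLoopA aF b l = l.all (fun p =>
        PySem.Set.equal (PySem.Set.ofList (pvLookup aF p.1)) (PySem.Set.ofList (pvLookup b p.1)))
  | [] => rfl
  | (k, v) :: rest => by
      cases h : PySem.Set.equal (PySem.Set.ofList (pvLookup aF k)) (PySem.Set.ofList (pvLookup b k)) <;>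
        simp [pvChkLoopA, h, pvChkLoopA_eq_all aF b rest]

theorem checkEquality_eq (a b : List (String × List Int)) :
    pvCheckEqualityA a b = pvCheckEqualityB a b := by
  unfold pvCheckEqualityA pvCheckEqualityB
  rw [pvChkLoopA_eq_all, List.all_map]
  cases h : pvKeysEq a b
  · simp [h]
  · simp [h, Function.comp_def]

theorem foldl_append_singleton {α β : Type} (f : α → β) :
    ∀ (l : List α) (acc : List β), l.foldl (fun acc a => acc ++ [f a]) acc = acc ++ l.map f
  | [], acc => by simp
  | x :: rest, acc => by
      simp [List.foldl_cons, foldl_append_singleton f rest, List.append_assoc]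

-- proof-only helper: the common early-exit scan over a boolean list, carrying the index
def pvFused : List Bool → Int → Bool × Int
  | [], _ => (false, -1)
  | x :: rest, i => if x then (true, i) else pvFused rest (i + 1)

theorem scan_eq_fused :
    ∀ (post pre : List Bool),
      pvScanLoopA (pre ++ post)
          (PySem.List.pyRange (pre.length : Int) ((pre.length + post.length : Nat) : Int) 1)
        = pvFused post (pre.length : Int)
  | [], pre => by simp [PySem.List.pyRange, pvScanLoopA, pvFused]
  | x :: rest, pre => by
      have hlt : (pre.length : Int) < ((pre.length + (x :: rest).length : Nat) : Int) := by
        simp only [List.length_cons]; push_cast; omega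
      rw [PySem.List.pyRange_one_cons hlt]
      simp only [pvScanLoopA]
      have hget : PySem.List.pyGetD (pre ++ x :: rest) (pre.length : Int) false = x := by
        simp [PySem.List.pyGetD_natCast, List.getD_eq_getElem?_getD]
      rw [hget]
      cases x
      · have hre : pre ++ false :: rest = (pre ++ [false]) ++ rest := by simp
        have hlen : ((pre.length + (false :: rest).length : Nat) : Int)
            = (((pre ++ [false]).length + rest.length : Nat) : Int) := by
          simp only [List.length_cons, List.length_append, List.length_nil]; push_cast; omega
        have hidx : (pre.length : Int) + 1 = (((pre ++ [false]).length : Nat) : Int) := by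
          simp
        rw [hre, hlen, hidx, scan_eq_fused rest (pre ++ [false])]
        simp [pvFused]
      · simp [pvFused]

theorem mcLoopB_eq_fused (b : List (String × List Int)) :
    ∀ (l : List (List (String × List Int))) (i : Int),
      pvMcLoopB b l i = pvFused (l.map (fun a => pvCheckEqualityB a b)) i
  | [], i => rfl
  | a :: rest, i => by
      cases h : pvCheckEqualityB a b <;>
        simp [pvMcLoopB, pvFused, h, mcLoopB_eq_fused b rest (i + 1)]

-- ===== VERDICT (by name: the statement is the Claim_ definition above) =====
theorem multicheck_spec : Claim_equal_multicheck := by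
  intro a_list b _
  unfold Spec_multicheck multicheck multicheck_alt
  simp only [foldl_append_singleton, List.nil_append]
  have h1 := scan_eq_fused (a_list.map (fun a => pvCheckEqualityA a b)) []
  simp only [List.nil_append, List.length_nil, Nat.zero_add, Nat.cast_zero] at h1
  rw [h1, mcLoopB_eq_fused]
  congr 1
  exact List.map_congr_left (fun a _ => checkEquality_eq a b)
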